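-- pv_equiv track=rewrite | github.com/AlexandreDoneux/LINFO1361-projet2-Oxono | alphabeta/alpha_beta_version_finale.py | score_symbol_window
-- ===== SOURCE A (Python) =====
-- def score_symbol_window(window, symbol):
--
--     weights = {3: 10, 2: 1}
--     count = 0
--
--     for cell in window:
--         if cell is not None :
--             if cell[0] == symbol:
--                 count += 1
--             else:
--                 return 0 # La ligne est bloquée par l'adversaire
--
--     return weights.get(count, 0)  # le 2eme argument est la si jamais get ne trouve pas la valeur count dans le dico
-- ===== SOURCE B (Python) =====
-- def score_symbol_window(window, symbol):
--     # Distinct owners of occupied cells; any owner other than `symbol` blocks the line.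
--     owners = {c[0] for c in window if c is not None}
--     if owners - {symbol}:
--         return 0
--     occupied = sum(c is not None for c in window)
--     return {3: 10, 2: 1}.get(occupied, 0)
-- ===== Notes on version B (the rewrite author's own statement) =====
-- stated objective: alternative
-- what changed: B builds the set of distinct owners of occupied cells and decides 'blocked' by a set difference against {symbol}, then scores the count of occupied cells; A instead counts matches in one scan and returns 0 early at the first mismatching cell.
import Mathlib
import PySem

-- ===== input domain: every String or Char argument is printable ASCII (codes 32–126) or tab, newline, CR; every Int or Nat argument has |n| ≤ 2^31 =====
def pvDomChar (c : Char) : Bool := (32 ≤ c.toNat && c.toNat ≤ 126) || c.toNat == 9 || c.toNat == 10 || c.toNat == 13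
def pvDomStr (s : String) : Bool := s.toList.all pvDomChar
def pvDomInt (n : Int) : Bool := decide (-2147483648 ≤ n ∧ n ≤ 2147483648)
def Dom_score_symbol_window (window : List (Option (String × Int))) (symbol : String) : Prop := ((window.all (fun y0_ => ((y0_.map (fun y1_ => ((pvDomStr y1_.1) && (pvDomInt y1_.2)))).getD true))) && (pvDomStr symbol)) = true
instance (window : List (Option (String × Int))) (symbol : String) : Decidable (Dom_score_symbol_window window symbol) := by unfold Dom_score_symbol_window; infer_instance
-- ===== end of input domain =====

-- B detects a blocked line via the set of distinct owners minus {symbol}, then scores the occupied-cell count; same values as A's early-return match-counting scan (alternative).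
-- ===== PORT A =====
def pyWeights : PySem.Dict Int Int := PySem.Dict.ofList [((3 : Int), (10 : Int)), (2, 1)]

-- the for-loop of A with its early `return 0`, as structural recursion over the window
def scoreA_loop (symbol : String) : List (Option (String × Int)) → Int → Int
  | [], count => pyWeights.getD count 0
  | cell :: rest, count =>
    match cell with
    | none => scoreA_loop symbol rest count
    | some c => if c.1 == symbol then scoreA_loop symbol rest (count + 1) else 0

def score_symbol_window (window : List (Option (String × Int))) (symbol : String) : Int :=
  scoreA_loop symbol window 0

-- ===== PORT B =====
def score_symbol_window_alt (window : List (Option (String × Int))) (symbol : String) : Int :=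
  let owners : PySem.Set String := PySem.Set.ofList ((window.filterMap id).map Prod.fst)
  if PySem.Set.diff owners (PySem.Set.ofList [symbol]) ≠ [] then 0
  else
    let occupied : Int := (window.map (fun c => if c ≠ none then (1 : Int) else 0)).sum
    pyWeights.getD occupied 0

-- ===== PRECONDITION & SPEC =====
def Spec_score_symbol_window (window : List (Option (String × Int))) (symbol : String) (out : Int) : Prop := out = score_symbol_window_alt window symbol
instance (window : List (Option (String × Int))) (symbol : String) (out : Int) : Decidable (Spec_score_symbol_window window symbol out) := by unfold Spec_score_symbol_window; infer_instance

-- ===== CLAIM (what is proved, stated in full; the proofs are below) =====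
def Claim_equal_score_symbol_window : Prop := ∀ (window : List (Option (String × Int))) (symbol : String), Dom_score_symbol_window window symbol → Spec_score_symbol_window window symbol (score_symbol_window window symbol)

-- ===== LEMMAS AND PROOFS =====
-- A's loop computes: 0 if any occupied cell mismatches, else the weight of count + (number of occupied cells)
theorem scoreA_loop_eq (symbol : String) (l : List (Option (String × Int))) (count : Int) :
    scoreA_loop symbol l count =
      if (l.filterMap id).all (fun c => c.1 == symbol)
      then pyWeights.getD (count + ((l.filterMap id).length : Int)) 0
      else 0 := by
  induction l generalizing count with
  | nil => simp [scoreA_loop]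
  | cons cell rest ih =>
    cases cell with
    | none => simpa [scoreA_loop] using ih count
    | some c =>
      by_cases h : c.1 == symbol
      · simp only [scoreA_loop, h, if_true, ih (count + 1)]
        have hfm : List.filterMap id (some c :: rest) = c :: List.filterMap id rest := by simp
        rw [hfm]
        simp only [List.all_cons, h, Bool.true_and, List.length_cons]
        split_ifs with hall
        · congr 1; push_cast; ring
        · rfl
      · simp [scoreA_loop, h]

-- B's blocked test: owners - {symbol} is empty iff every occupied cell's owner equals symbol
theorem diff_empty_iff (symbol : String) (fs : List String) :
    PySem.Set.diff (PySem.Set.ofList fs) (PySem.Set.ofList [symbol]) = [] ↔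
      fs.all (fun s => s == symbol) = true := by
  simp only [PySem.Set.diff, List.filter_eq_nil_iff, List.all_eq_true]
  constructor
  · intro h x hx
    have := h x ((PySem.Set.mem_ofList _ _).mpr hx)
    simp [PySem.Set.contains, PySem.Set.ofList] at this
    simp [this]
  · intro h x hx
    have hxs := eq_of_beq (h x ((PySem.Set.mem_ofList _ _).mp hx))
    subst hxs
    simp [PySem.Set.contains, PySem.Set.ofList, PySem.Set.add, PySem.Set.empty]

-- B's occupied sum equals the number of non-None cells
theorem occupied_eq (window : List (Option (String × Int))) :
    (window.map (fun c => if c ≠ none then (1 : Int) else 0)).sum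
      = ((window.filterMap id).length : Int) := by
  induction window with
  | nil => simp
  | cons cell rest ih =>
    cases cell
    · simpa using ih
    · simp only [List.map_cons, List.sum_cons, List.filterMap_cons, id, List.length_cons]
      rw [if_pos (by simp), ih]
      push_cast
      show (1:Int) + (List.filterMap id rest).length = (List.filterMap id rest).length + 1
      ring

-- ===== VERDICT (by name: the statement is the Claim_ definition above) =====
theorem score_symbol_window_spec : Claim_equal_score_symbol_window := by
  intro window symbol _
  unfold Spec_score_symbol_window score_symbol_window score_symbol_window_alt
  rw [scoreA_loop_eq, occupied_eq]
  have hall : ((window.filterMap id).map Prod.fst).all (fun s => s == symbol)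
      = (window.filterMap id).all (fun c => c.1 == symbol) := by
    simp [List.all_map, Function.comp]
  by_cases hb : (window.filterMap id).all (fun c => c.1 == symbol) = true
  · have hd : PySem.Set.diff (PySem.Set.ofList ((window.filterMap id).map Prod.fst))
        (PySem.Set.ofList [symbol]) = [] :=
      (diff_empty_iff symbol _).mpr (by rw [hall]; exact hb)
    rw [if_pos hb, if_neg (not_not.mpr hd), zero_add]
  · have hd : PySem.Set.diff (PySem.Set.ofList ((window.filterMap id).map Prod.fst))
        (PySem.Set.ofList [symbol]) ≠ [] := by
      rw [Ne, diff_empty_iff, hall]; exact hb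
    rw [if_neg hb, if_pos hd]
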